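-- pv_equiv track=rewrite | github.com/dtunkelang/y2karaoke | tools/compare_benchmark_correction.py | _summarize_song_comparison
-- ===== SOURCE A (Python) =====
-- from typing import Any
--
-- def _summarize_song_comparison(song_rows: list[dict[str, Any]]) -> dict[str, Any]:
--     improved = sum(1 for row in song_rows if row["net_score"] > 0)
--     regressed = sum(1 for row in song_rows if row["net_score"] < 0)
--     unchanged = sum(1 for row in song_rows if row["net_score"] == 0)
--     return {
--         "songs_compared": len(song_rows),
--         "songs_net_improved": improved,
--         "songs_net_regressed": regressed,
--         "songs_net_unchanged": unchanged,
--     }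
-- ===== SOURCE B (Python) =====
-- def _summarize_song_comparison(song_rows):
--     signs = {}
--     for row in song_rows:
--         ns = row["net_score"]
--         sign = (ns > 0) - (ns < 0)
--         signs[sign] = signs.get(sign, 0) + 1
--     return {
--         "songs_compared": len(song_rows),
--         "songs_net_improved": signs.get(1, 0),
--         "songs_net_regressed": signs.get(-1, 0),
--         "songs_net_unchanged": signs.get(0, 0),
--     }
-- ===== Notes on version B (the rewrite author's own statement) =====
-- stated objective: alternative
-- what changed: Replaces A's three per-predicate scans with a sign histogram: one pass maps each net_score to its sign (ns>0)-(ns<0) and counts occurrences in a dict, from which the three buckets are read.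
import Mathlib
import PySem

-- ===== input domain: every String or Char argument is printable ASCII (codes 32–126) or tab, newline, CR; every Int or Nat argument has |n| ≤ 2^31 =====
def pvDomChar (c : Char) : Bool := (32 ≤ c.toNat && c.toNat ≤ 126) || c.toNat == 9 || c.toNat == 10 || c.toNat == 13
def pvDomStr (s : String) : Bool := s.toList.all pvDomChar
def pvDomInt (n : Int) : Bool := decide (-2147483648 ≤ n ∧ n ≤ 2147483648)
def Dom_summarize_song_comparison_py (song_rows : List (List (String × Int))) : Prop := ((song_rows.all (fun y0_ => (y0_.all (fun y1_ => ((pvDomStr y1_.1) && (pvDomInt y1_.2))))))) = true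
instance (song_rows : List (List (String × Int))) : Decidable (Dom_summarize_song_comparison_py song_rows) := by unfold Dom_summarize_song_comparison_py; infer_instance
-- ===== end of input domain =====

-- B replaces A's three per-predicate scans with a sign histogram (dict keyed by
-- (ns>0)-(ns<0)) built in one pass, then reads the three buckets; objective: alternative.

-- ===== PORT A =====
-- row["net_score"]: first-match lookup in the row's association list (none = KeyError, excluded by Pre_)
def pvNetScore? (row : List (String × Int)) : Option Int :=
  (PySem.Dict.mk row).get? "net_score"

-- sum(1 for row in song_rows if p(row["net_score"]))
def pvCountA (p : Int → Bool) (song_rows : List (List (String × Int))) : Int :=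
  song_rows.foldl (fun n row =>
    match pvNetScore? row with
    | some v => if p v then n + 1 else n
    | none => n) 0

def summarize_song_comparison_py (song_rows : List (List (String × Int))) : List (String × Int) :=
  let improved := pvCountA (fun v => v > 0) song_rows
  let regressed := pvCountA (fun v => v < 0) song_rows
  let unchanged := pvCountA (fun v => v == 0) song_rows
  [("songs_compared", (song_rows.length : Int)),
   ("songs_net_improved", improved),
   ("songs_net_regressed", regressed),
   ("songs_net_unchanged", unchanged)]

-- ===== PORT B =====
-- sign = (ns > 0) - (ns < 0)
def pvSign (ns : Int) : Int :=
  (if ns > 0 then (1:Int) else 0) - (if ns < 0 then (1:Int) else 0)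

-- the loop: signs[sign] = signs.get(sign, 0) + 1
def pvHistB (song_rows : List (List (String × Int))) : PySem.Dict Int Int :=
  song_rows.foldl (fun signs row =>
    match pvNetScore? row with
    | some ns =>
        let sign := pvSign ns
        signs.insert sign (signs.getD sign 0 + 1)
    | none => signs) PySem.Dict.empty

def summarize_song_comparison_py_alt (song_rows : List (List (String × Int))) : List (String × Int) :=
  let signs := pvHistB song_rows
  [("songs_compared", (song_rows.length : Int)),
   ("songs_net_improved", signs.getD 1 0),
   ("songs_net_regressed", signs.getD (-1) 0),
   ("songs_net_unchanged", signs.getD 0 0)]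

-- ===== PRECONDITION & SPEC =====
-- Pre_ excludes rows with no "net_score" key, on which Python A raises KeyError.
def Pre_summarize_song_comparison_py (song_rows : List (List (String × Int))) : Prop :=
  ∀ row ∈ song_rows, (PySem.Dict.mk row).contains "net_score" = true
instance (song_rows : List (List (String × Int))) : Decidable (Pre_summarize_song_comparison_py song_rows) := by unfold Pre_summarize_song_comparison_py; infer_instance

def pvWitness_summarize_song_comparison_py : (List (List (String × Int))) :=
  [[("net_score", 3)], [("net_score", -1), ("x", 2)], [("net_score", 0)]]

def Spec_summarize_song_comparison_py (song_rows : List (List (String × Int))) (out : List (String × Int)) : Prop := out = summarize_song_comparison_py_alt song_rows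
instance (song_rows : List (List (String × Int))) (out : List (String × Int)) : Decidable (Spec_summarize_song_comparison_py song_rows out) := by unfold Spec_summarize_song_comparison_py; infer_instance

-- ===== CLAIM =====
def Claim_equal_summarize_song_comparison_py : Prop := ∀ (song_rows : List (List (String × Int))), Dom_summarize_song_comparison_py song_rows → Pre_summarize_song_comparison_py song_rows → Spec_summarize_song_comparison_py song_rows (summarize_song_comparison_py song_rows)

-- ===== LEMMAS AND PROOFS =====

-- the sign of each row's net_score, for rows that have one
def pvSigns (song_rows : List (List (String × Int))) : List Int :=
  song_rows.filterMap (fun row => (pvNetScore? row).map pvSign)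

-- B's dict fold is the counter fold over the sign list
theorem pvHistB_eq_signs (song_rows : List (List (String × Int))) :
    ∀ d : PySem.Dict Int Int,
      song_rows.foldl (fun signs row =>
        match pvNetScore? row with
        | some ns =>
            let sign := pvSign ns
            signs.insert sign (signs.getD sign 0 + 1)
        | none => signs) d =
      (pvSigns song_rows).foldl (fun d x => d.insert x (d.getD x 0 + 1)) d := by
  induction song_rows with
  | nil => intro d; simp [pvSigns]
  | cons row rest ih =>
    intro d
    cases hv : pvNetScore? row with
    | none => simp [pvSigns, hv, ih]
    | some v =>
      simp only [pvSigns, List.filterMap_cons, hv, Option.map_some, List.foldl_cons]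
      exact ih _

-- shifting the accumulator out of A's counting fold
theorem pvCountA_shift (p : Int → Bool) (rs : List (List (String × Int))) :
    ∀ a : Int,
      rs.foldl (fun n r =>
        match pvNetScore? r with
        | some v => if p v then n + 1 else n
        | none => n) a =
      a + rs.foldl (fun n r =>
        match pvNetScore? r with
        | some v => if p v then n + 1 else n
        | none => n) 0 := by
  induction rs with
  | nil => intro a; simp
  | cons r rs ih =>
    intro a
    cases hv : pvNetScore? r with
    | none => simp only [List.foldl_cons, hv]; exact ih a
    | some v =>
      simp only [List.foldl_cons, hv]
      by_cases hp : p v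
      · simp only [hp, if_true]
        rw [ih (a + 1), ih (0 + 1)]
        omega
      · simp only [hp]
        exact ih a

-- one cons step of A's count
theorem pvCountA_cons (p : Int → Bool) (row : List (String × Int))
    (rest : List (List (String × Int))) :
    pvCountA p (row :: rest) =
      (match pvNetScore? row with
        | some v => if p v then (1:Int) else 0
        | none => 0) + pvCountA p rest := by
  simp only [pvCountA, List.foldl_cons]
  cases hv : pvNetScore? row with
  | none => simp only [hv]; omega
  | some v =>
    simp only [hv]
    by_cases hp : p v
    · simp only [hp, if_true]
      rw [pvCountA_shift p rest (0 + 1)]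
      omega
    · rw [Bool.not_eq_true] at hp
      simp only [hp, Bool.false_eq_true, if_false]
      omega

-- counting a target sign in the sign list = A's predicate count
theorem count_signs_eq (p : Int → Bool) (s : Int)
    (h : ∀ v, (pvSign v == s) = p v) (song_rows : List (List (String × Int))) :
    ((pvSigns song_rows).count s : Int) = pvCountA p song_rows := by
  induction song_rows with
  | nil => simp [pvSigns, pvCountA]
  | cons row rest ih =>
    rw [pvCountA_cons]
    cases hv : pvNetScore? row with
    | none => simp only [pvSigns, List.filterMap_cons, hv] at *; simpa using ih
    | some v =>
      simp only [pvSigns, List.filterMap_cons, hv, Option.map_some] at *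
      rw [List.count_cons]
      have := h v
      by_cases hp : p v
      · simp only [hp, if_true]
        have hs : (pvSign v == s) = true := by rw [this, hp]
        simp [hs, ← ih]
        omega
      · rw [Bool.not_eq_true] at hp
        have hs : (pvSign v == s) = false := by rw [this, hp]
        simp [hs, hp, ← ih]

theorem getD_hist (song_rows : List (List (String × Int))) (s : Int) :
    (pvHistB song_rows).getD s 0 = ((pvSigns song_rows).count s : Int) := by
  rw [pvHistB, pvHistB_eq_signs]
  rw [PySem.Dict.getD_foldl_insert_add_one]
  simp [PySem.Dict.getD, PySem.Dict.empty, PySem.Dict.get?]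

-- ===== VERDICT =====
theorem summarize_song_comparison_py_spec : Claim_equal_summarize_song_comparison_py := by
  intro song_rows _ _
  unfold Spec_summarize_song_comparison_py
  simp only [summarize_song_comparison_py, summarize_song_comparison_py_alt]
  rw [getD_hist, getD_hist, getD_hist,
      count_signs_eq (fun v => v > 0) 1 (by intro v; simp only [pvSign]; split_ifs <;> simp <;> omega),
      count_signs_eq (fun v => v < 0) (-1) (by intro v; simp only [pvSign]; split_ifs <;> simp <;> omega),
      count_signs_eq (fun v => v == 0) 0 (by intro v; simp only [pvSign]; split_ifs <;> simp <;> omega)]
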